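-- pv_equiv track=rewrite | github.com/smthom1/cs271_ai-project | agent_inf_50-50.py | solve_component_smart
-- ===== SOURCE A (Python) =====
-- SOLVER_MAX_SOLUTIONS = 50
--
-- def solve_component_smart(coords, constraints):
--     if not constraints: return []
--
--     n = len(coords)
--     var_counts = [0] * n
--     for needed, vars in constraints:
--         for v in vars: var_counts[v] += 1
--
--     sorted_indices = sorted(range(n), key=lambda i: -var_counts[i])
--     old_to_new = {old: new for new, old in enumerate(sorted_indices)}
--     sorted_constraints = []
--     for needed, vars in constraints:
--         new_vars = tuple(sorted(old_to_new[v] for v in vars))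
--         sorted_constraints.append((needed, new_vars))
--
--     var_to_cons = [[] for _ in range(n)]
--     for i, (needed, vars) in enumerate(sorted_constraints):
--         for v in vars: var_to_cons[v].append((needed, vars))
--
--     solutions = []
--     assignment = [-1] * n
--
--     def solve(idx):
--         if len(solutions) >= SOLVER_MAX_SOLUTIONS: return
--         if idx == n:
--             original_order_sol = [0] * n
--             for new_i, val in enumerate(assignment):
--                 original_order_sol[sorted_indices[new_i]] = val
--             solutions.append(tuple(original_order_sol))
--             return
--
--         for val in [0, 1]:
--             assignment[idx] = val
--             valid = True
--             for needed, vars in var_to_cons[idx]: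
--                 curr_sum = 0
--                 unassigned_count = 0
--                 for v in vars:
--                     v_val = assignment[v]
--                     if v_val == 1: curr_sum += 1
--                     elif v_val == -1: unassigned_count += 1
--
--                 if curr_sum > needed:
--                     valid = False; break
--                 if curr_sum + unassigned_count < needed:
--                     valid = False; break
--
--             if valid:
--                 solve(idx + 1)
--                 if len(solutions) >= SOLVER_MAX_SOLUTIONS: return
--         assignment[idx] = -1
--     solve(0)
--     return solutions
-- ===== SOURCE B (Python) =====
-- SOLVER_MAX_SOLUTIONS = 50
--
--
-- def solve_component_smart(coords, constraints):
--     if not constraints: return []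
--
--     n = len(coords)
--     # occurrence counts per variable, computed by counting instead of incrementing
--     all_vars = [v for _, vs in constraints for v in vs]
--     var_counts = [all_vars.count(i) for i in range(n)]
--
--     sorted_indices = sorted(range(n), key=lambda i: -var_counts[i])
--     # inverse permutation as a plain list instead of a dict
--     new_of = [0] * n
--     for pos, old in enumerate(sorted_indices):
--         new_of[old] = pos
--     sorted_constraints = [(needed, tuple(sorted(new_of[v] for v in vs)))
--                           for needed, vs in constraints]
--
--     def ok(a, needed, vs):
--         s = sum(1 for v in vs if a[v] == 1)
--         u = sum(1 for v in vs if a[v] == -1)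
--         return s <= needed <= s + u
--
--     # explicit iterative DFS over (idx, partial-assignment) frames; no var_to_cons
--     # index: the constraints touching idx are filtered from sorted_constraints on the fly
--     solutions = []
--     stack = [(0, [-1] * n)]
--     while stack and len(solutions) < SOLVER_MAX_SOLUTIONS:
--         idx, a = stack.pop()
--         if idx == n:
--             sol = [0] * n
--             for pos, val in zip(sorted_indices, a):
--                 sol[pos] = val
--             solutions.append(tuple(sol))
--         else:
--             for val in (1, 0):  # push 1 first so the 0-branch is expanded first
--                 child = a.copy()
--                 child[idx] = val
--                 if all(ok(child, needed, vs)
--                        for needed, vs in sorted_constraints if idx in vs):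
--                     stack.append((idx + 1, child))
--     return solutions
-- ===== Notes on version B (the rewrite author's own statement) =====
-- stated objective: alternative
-- what changed: The recursive backtracking with shared mutable state and precomputed var_counts/old_to_new dict/var_to_cons index is replaced by: per-variable occurrence counting (list.count over the flattened vars), an inverse-permutation list instead of the old_to_new dict, no var_to_cons index at all (the DFS filters sorted_constraints by membership on the fly), and an explicit iterative DFS over a stack of (idx, partial-assignment) frames in place of the recursion.
import Mathlib
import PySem

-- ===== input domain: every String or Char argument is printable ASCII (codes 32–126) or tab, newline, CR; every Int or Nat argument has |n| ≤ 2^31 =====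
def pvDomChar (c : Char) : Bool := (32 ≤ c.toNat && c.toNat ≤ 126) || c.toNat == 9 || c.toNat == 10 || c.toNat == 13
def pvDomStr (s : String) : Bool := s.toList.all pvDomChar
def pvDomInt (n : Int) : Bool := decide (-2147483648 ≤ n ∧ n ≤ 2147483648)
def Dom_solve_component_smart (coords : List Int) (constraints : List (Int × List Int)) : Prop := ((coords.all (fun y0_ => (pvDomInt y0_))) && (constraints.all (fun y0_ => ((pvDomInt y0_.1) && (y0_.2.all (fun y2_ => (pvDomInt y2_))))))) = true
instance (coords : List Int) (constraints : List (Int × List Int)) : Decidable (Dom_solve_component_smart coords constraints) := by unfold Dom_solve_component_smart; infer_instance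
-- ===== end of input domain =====

-- B replaces A's recursive backtracking and its precomputed indexes by: per-variable counting
-- (list.count on the flattened vars) instead of increment loops, an inverse-permutation list
-- instead of the old_to_new dict, no var_to_cons index (the DFS filters sorted_constraints by
-- membership on the fly), and an explicit stack of (idx, partial-assignment) frames instead of
-- recursion; the return values are proved equal.

-- ===== PORT A =====

-- A's inner constraint check: one loop over vars accumulating (curr_sum, unassigned_count),
-- with early break on a violated constraint.
def pvCheckA (a : List Int) : List (Int × List Int) → Bool
  | [] => true
  | (needed, vars) :: rest =>
    let p : Int × Int := vars.foldl (fun (acc : Int × Int) v =>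
        let vv := PySem.List.pyGetD a v 0
        if vv = 1 then (acc.1 + 1, acc.2)
        else if vv = -1 then (acc.1, acc.2 + 1)
        else acc) (0, 0)
    if needed < p.1 then false
    else if p.1 + p.2 < needed then false
    else pvCheckA a rest

-- A's solution emit: sol = [0]*n; for new_i, val in enumerate(assignment): sol[sorted_indices[new_i]] = val
-- (indices are in range in every reachable state; pyGetD/pySetD are the total forms).
def pvRemapA (si : List Int) (n : Nat) (a : List Int) : List Int :=
  (PySem.List.enumerate a).foldl
    (fun sol p => PySem.List.pySetD sol (PySem.List.pyGetD si p.1 0) p.2)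
    (List.replicate n 0)

-- A's recursive solve(idx); the fuel argument (always ≥ n+1-idx at call sites) only makes the
-- recursion structural, it never runs out.  'assignment[idx] = val' on the entry array is
-- a.set idx val (children restore their own slots before returning, so the entry array is
-- exactly the functional state).
def pvSolveA (n : Nat) (vtc : List (List (Int × List Int))) (si : List Int) :
    Nat → Nat → List Int → List (List Int) → List (List Int)
  | 0, _, _, sols => sols
  | fuel + 1, idx, a, sols =>
    if 50 ≤ sols.length then sols
    else if idx = n then sols ++ [pvRemapA si n a]
    else
      -- val = 0
      let a0 := a.set idx 0
      let s1 := if pvCheckA a0 (vtc.getD idx []) then pvSolveA n vtc si fuel (idx + 1) a0 sols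
                else sols
      -- mid-loop 'if len(solutions) >= 50: return'
      if 50 ≤ s1.length then s1
      else
        -- val = 1
        let a1 := a.set idx 1
        if pvCheckA a1 (vtc.getD idx []) then pvSolveA n vtc si fuel (idx + 1) a1 s1 else s1

def solve_component_smart (coords : List Int) (constraints : List (Int × List Int)) : List (List Int) :=
  if constraints = [] then []
  else
    let n := coords.length
    let var_counts : List Int := constraints.foldl
      (fun vc c => c.2.foldl (fun vc v => PySem.List.pySetD vc v (PySem.List.pyGetD vc v 0 + 1)) vc)
      (List.replicate n 0)
    let sorted_indices := PySem.List.sorted (PySem.List.pyRange 0 (n : Int) 1)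
      (fun i => -(PySem.List.pyGetD var_counts i 0)) false
    -- {old: new for new, old in enumerate(sorted_indices)}
    let old_to_new : PySem.Dict Int Int := (PySem.List.enumerate sorted_indices).foldl
      (fun d p => PySem.Dict.insert d p.2 p.1) PySem.Dict.empty
    -- old_to_new[v] raises KeyError when v is not a key — excluded by Pre_; getD 0 is the total form
    let sorted_constraints : List (Int × List Int) := constraints.map
      (fun c => (c.1, PySem.List.sorted (c.2.map (fun v => (PySem.Dict.get? old_to_new v).getD 0)) (fun x => x) false))
    let var_to_cons : List (List (Int × List Int)) := (PySem.List.enumerate sorted_constraints).foldl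
      (fun (vt : List (List (Int × List Int))) p =>
        p.2.2.foldl (fun vt v => PySem.List.pySetD vt v (PySem.List.pyGetD vt v [] ++ [p.2])) vt)
      (List.replicate n [])
    pvSolveA n var_to_cons sorted_indices (n + 1) 0 (List.replicate n (-1)) []

-- ===== PORT B =====

-- B's ok(a, needed, vs): two generator sums, then s <= needed <= s + u.
def pvOkB (a : List Int) (c : Int × List Int) : Bool :=
  let s : Int := ((c.2.filter (fun v => decide (PySem.List.pyGetD a v 0 = 1))).length : Int)
  let u : Int := ((c.2.filter (fun v => decide (PySem.List.pyGetD a v 0 = -1))).length : Int)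
  decide (s ≤ c.1) && decide (c.1 ≤ s + u)

-- B's validity test at depth idx: all(ok(..) for needed, vs in sorted_constraints if idx in vs)
def pvCheckB (a : List Int) (idx : Nat) (scs : List (Int × List Int)) : Bool :=
  (scs.filter (fun c => decide ((idx : Int) ∈ c.2))).all (fun c => pvOkB a c)

-- B's emit: sol = [0]*n; for pos, val in zip(sorted_indices, a): sol[pos] = val
def pvRemapB (si : List Int) (n : Nat) (a : List Int) : List Int :=
  (si.zip a).foldl (fun sol p => PySem.List.pySetD sol p.1 p.2) (List.replicate n 0)

-- B's while loop: head of the list is the top of the stack (push 1 then 0 ⇒ the 0-frame is on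
-- top); the fuel (3^(n+1) at the call site) only makes the loop structural, it never runs out.
def pvLoopB (n : Nat) (scs : List (Int × List Int)) (si : List Int) :
    Nat → List (Nat × List Int) → List (List Int) → List (List Int)
  | _, [], sols => sols
  | 0, _, sols => sols
  | fuel + 1, (idx, a) :: rest, sols =>
    if 50 ≤ sols.length then sols
    else if idx = n then pvLoopB n scs si fuel rest (sols ++ [pvRemapB si n a])
    else
      let a1 := a.set idx 1
      let a0 := a.set idx 0
      pvLoopB n scs si fuel
        ((if pvCheckB a0 idx scs then [(idx + 1, a0)] else []) ++
         (if pvCheckB a1 idx scs then [(idx + 1, a1)] else []) ++ rest) sols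

def solve_component_smart_alt (coords : List Int) (constraints : List (Int × List Int)) : List (List Int) :=
  if constraints = [] then []
  else
    let n := coords.length
    let all_vars : List Int := constraints.flatMap (fun c => c.2)
    let var_counts : List Int :=
      (PySem.List.pyRange 0 (n : Int) 1).map (fun i => (PySem.List.count all_vars i : Int))
    let sorted_indices := PySem.List.sorted (PySem.List.pyRange 0 (n : Int) 1)
      (fun i => -(PySem.List.pyGetD var_counts i 0)) false
    -- inverse permutation as a plain list
    let new_of : List Int := (PySem.List.enumerate sorted_indices).foldl
      (fun l p => PySem.List.pySetD l p.2 p.1) (List.replicate n 0)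
    let sorted_constraints : List (Int × List Int) := constraints.map
      (fun c => (c.1, PySem.List.sorted (c.2.map (fun v => PySem.List.pyGetD new_of v 0)) (fun x => x) false))
    pvLoopB coords.length sorted_constraints sorted_indices (3 ^ (coords.length + 1))
      [(0, List.replicate coords.length (-1))] []

-- ===== PRECONDITION & SPEC =====
-- Pre_ excludes exactly the inputs where Python A raises: a constraint variable outside
-- [0, len(coords)) hits an IndexError in var_counts or a KeyError in old_to_new.
def Pre_solve_component_smart (coords : List Int) (constraints : List (Int × List Int)) : Prop :=
  ∀ c ∈ constraints, ∀ v ∈ c.2, 0 ≤ v ∧ v < (coords.length : Int)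

instance (coords : List Int) (constraints : List (Int × List Int)) : Decidable (Pre_solve_component_smart coords constraints) := by unfold Pre_solve_component_smart; infer_instance

def pvWitness_solve_component_smart : List Int × (List (Int × List Int)) :=
  ([0, 1], [(1, [0, 1])])

def Spec_solve_component_smart (coords : List Int) (constraints : List (Int × List Int)) (out : List (List Int)) : Prop := out = solve_component_smart_alt coords constraints
instance (coords : List Int) (constraints : List (Int × List Int)) (out : List (List Int)) : Decidable (Spec_solve_component_smart coords constraints out) := by unfold Spec_solve_component_smart; infer_instance

-- ===== CLAIM (what is proved, stated in full; the proofs are below) =====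
def Claim_equal_solve_component_smart : Prop := ∀ (coords : List Int) (constraints : List (Int × List Int)), Dom_solve_component_smart coords constraints → Pre_solve_component_smart coords constraints → Spec_solve_component_smart coords constraints (solve_component_smart coords constraints)

-- ===== LEMMAS AND PROOFS =====

-- ---- (1) the two var_counts lists are equal ----

-- getD after set (general List fact; not found under a library name)
theorem pv_getD_set (l : List Int) (m j : Nat) (a : Int) (h : m < l.length) :
    (l.set m a).getD j 0 = if j = m then a else l.getD j 0 := by
  rw [List.getD_eq_getElem?_getD, List.getD_eq_getElem?_getD, List.getElem?_set]
  by_cases h1 : j = m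
  · subst h1; simp [h]
  · rw [if_neg (fun hh => h1 hh.symm), if_neg h1]

theorem pv_getD_set' (l : List (List (Int × List Int))) (m j : Nat) (a : List (Int × List Int)) (h : m < l.length) :
    (l.set m a).getD j [] = if j = m then a else l.getD j [] := by
  rw [List.getD_eq_getElem?_getD, List.getD_eq_getElem?_getD, List.getElem?_set]
  by_cases h1 : j = m
  · subst h1; simp [h]
  · rw [if_neg (fun hh => h1 hh.symm), if_neg h1]


-- one increment pass over vars vs counting: effect on one cell
theorem pv_incr_inner (vs : List Int) : ∀ (vc : List Int),
    (∀ v ∈ vs, 0 ≤ v ∧ v < (vc.length : Int)) →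
    (vs.foldl (fun vc v => PySem.List.pySetD vc v (PySem.List.pyGetD vc v 0 + 1)) vc).length = vc.length ∧
    ∀ i : Nat, i < vc.length →
      (vs.foldl (fun vc v => PySem.List.pySetD vc v (PySem.List.pyGetD vc v 0 + 1)) vc).getD i 0
        = vc.getD i 0 + (vs.count (i : Int) : Int) := by
  induction vs with
  | nil => intro vc _; simp
  | cons v vs' ih =>
    intro vc h
    obtain ⟨hv0, hvn⟩ := h v (List.mem_cons_self ..)
    simp only [List.foldl_cons]
    have hset : PySem.List.pySetD vc v (PySem.List.pyGetD vc v 0 + 1)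
        = vc.set v.toNat (vc.getD v.toNat 0 + 1) := by
      rw [PySem.List.pySetD_of_nonneg vc _ hv0,
        PySem.List.pyGetD_eq_getElem vc 0 hv0 (by simpa using hvn), List.getD_eq_getElem]
    rw [hset]
    have hvlt : v.toNat < vc.length := by omega
    have hlen : (vc.set v.toNat (vc.getD v.toNat 0 + 1)).length = vc.length := List.length_set ..
    have hrest : ∀ w ∈ vs', 0 ≤ w ∧ w < ((vc.set v.toNat (vc.getD v.toNat 0 + 1)).length : Int) := by
      intro w hw; rw [hlen]; exact h w (List.mem_cons_of_mem _ hw)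
    obtain ⟨ihl, ihg⟩ := ih _ hrest
    refine ⟨ihl.trans hlen, ?_⟩
    intro i hi
    rw [ihg i (by omega), pv_getD_set _ _ _ _ hvlt]
    have hc : ((v :: vs').count (i : Int) : Int) = (vs'.count (i : Int) : Int) + (if (i : Int) = v then 1 else 0) := by
      rw [List.count_cons]
      by_cases he : (i : Int) = v
      · simp [he]
      · simp only [he, if_false]
        rw [if_neg (by simp; exact fun hh => he hh.symm)]
        simp
    rw [hc]
    by_cases he : (i : Int) = v
    · rw [if_pos (by omega), if_pos he]
      have : i = v.toNat := by omega
      rw [this]; ring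
    · rw [if_neg (by omega), if_neg he]; ring

theorem pv_incr_outer (cs : List (Int × List Int)) : ∀ (vc : List Int),
    (∀ c ∈ cs, ∀ v ∈ c.2, 0 ≤ v ∧ v < (vc.length : Int)) →
    (cs.foldl (fun vc c => c.2.foldl (fun vc v => PySem.List.pySetD vc v (PySem.List.pyGetD vc v 0 + 1)) vc) vc).length = vc.length ∧
    ∀ i : Nat, i < vc.length →
      (cs.foldl (fun vc c => c.2.foldl (fun vc v => PySem.List.pySetD vc v (PySem.List.pyGetD vc v 0 + 1)) vc) vc).getD i 0
        = vc.getD i 0 + ((cs.flatMap (fun c => c.2)).count (i : Int) : Int) := by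
  induction cs with
  | nil => intro vc _; simp
  | cons c cs' ih =>
    intro vc h
    simp only [List.foldl_cons]
    obtain ⟨hl1, hg1⟩ := pv_incr_inner c.2 vc (h c (List.mem_cons_self ..))
    have hrest : ∀ c' ∈ cs', ∀ v ∈ c'.2, 0 ≤ v ∧ v <
        ((c.2.foldl (fun vc v => PySem.List.pySetD vc v (PySem.List.pyGetD vc v 0 + 1)) vc).length : Int) := by
      intro c' hc' v hv; rw [hl1]; exact h c' (List.mem_cons_of_mem _ hc') v hv
    obtain ⟨ihl, ihg⟩ := ih _ hrest
    refine ⟨ihl.trans hl1, ?_⟩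
    intro i hi
    rw [ihg i (by omega), hg1 i hi]
    simp [List.count_append]
    ring

theorem pv_var_counts_eq (n : Nat) (cs : List (Int × List Int))
    (h : ∀ c ∈ cs, ∀ v ∈ c.2, 0 ≤ v ∧ v < (n : Int)) :
    cs.foldl (fun vc c => c.2.foldl (fun vc v => PySem.List.pySetD vc v (PySem.List.pyGetD vc v 0 + 1)) vc) (List.replicate n 0)
      = (PySem.List.pyRange 0 (n : Int) 1).map (fun i => (PySem.List.count (cs.flatMap (fun c => c.2)) i : Int)) := by
  obtain ⟨hl, hg⟩ := pv_incr_outer cs (List.replicate n 0) (by simpa using h)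
  apply List.ext_getElem
  · rw [hl]; simp [PySem.List.length_pyRange_one]
  · intro i h1 h2
    have hi : i < n := by simpa using h2
    have hA : (cs.foldl (fun vc c => c.2.foldl (fun vc v => PySem.List.pySetD vc v (PySem.List.pyGetD vc v 0 + 1)) vc) (List.replicate n 0))[i]
        = ((cs.flatMap (fun c => c.2)).count (i : Int) : Int) := by
      rw [← List.getD_eq_getElem _ 0 h1, hg i (by simpa using hi)]
      simp
    rw [hA]
    rw [List.getElem_map, PySem.List.getElem_pyRange_one]
    simp [PySem.List.count_eq]

-- ---- (2) dict lookup = inverse-permutation list lookup ----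

theorem pv_invperm (ps : List (Int × Int)) : ∀ (d : PySem.Dict Int Int) (l : List Int),
    (∀ p ∈ ps, 0 ≤ p.2 ∧ p.2 < (l.length : Int)) →
    (∀ v : Int, 0 ≤ v → v < (l.length : Int) →
      ((PySem.Dict.get? d v).getD 0 = PySem.List.pyGetD l v 0)) →
    (ps.foldl (fun l p => PySem.List.pySetD l p.2 p.1) l).length = l.length ∧
    ∀ v : Int, 0 ≤ v → v < (l.length : Int) →
      ((PySem.Dict.get? (ps.foldl (fun d p => PySem.Dict.insert d p.2 p.1) d) v).getD 0
        = PySem.List.pyGetD (ps.foldl (fun l p => PySem.List.pySetD l p.2 p.1) l) v 0) := by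
  induction ps with
  | nil => intro d l _ hinv; exact ⟨rfl, hinv⟩
  | cons p ps' ih =>
    intro d l hk hinv
    obtain ⟨hk0, hkn⟩ := hk p (List.mem_cons_self ..)
    simp only [List.foldl_cons]
    have hset : PySem.List.pySetD l p.2 p.1 = l.set p.2.toNat p.1 :=
      PySem.List.pySetD_of_nonneg l _ hk0
    have hklt : p.2.toNat < l.length := by omega
    have hlen : (PySem.List.pySetD l p.2 p.1).length = l.length := by rw [hset]; simp
    have hinv' : ∀ v : Int, 0 ≤ v → v < ((PySem.List.pySetD l p.2 p.1).length : Int) →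
        ((PySem.Dict.get? (d.insert p.2 p.1) v).getD 0
          = PySem.List.pyGetD (PySem.List.pySetD l p.2 p.1) v 0) := by
      intro v hv0 hvn
      rw [hlen] at hvn
      rw [PySem.Dict.get?_insert, hset,
        PySem.List.pyGetD_eq_getElem _ 0 hv0 (by simpa using hvn), List.getElem_set]
      by_cases he : v = p.2
      · rw [if_pos he, if_pos (by omega)]
        simp
      · rw [if_neg he, if_neg (by omega)]
        rw [hinv v hv0 hvn, PySem.List.pyGetD_eq_getElem _ 0 hv0 (by simpa using hvn)]
    obtain ⟨ihl, ihg⟩ := ih (d.insert p.2 p.1) _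
      (fun q hq => by rw [hlen]; exact hk q (List.mem_cons_of_mem _ hq)) hinv'
    refine ⟨ihl.trans hlen, ?_⟩
    intro v hv0 hvn
    exact ihg v hv0 (by rw [hlen]; exact hvn)

-- every entry of the inverse-permutation list is in [0, n)
theorem pv_invperm_range (ps : List (Int × Int)) : ∀ (l : List Int),
    (∀ p ∈ ps, (0 ≤ p.1 ∧ p.1 < (l.length : Int)) ∧ 0 ≤ p.2) →
    (∀ x ∈ l, 0 ≤ x ∧ x < (l.length : Int)) →
    ∀ x ∈ ps.foldl (fun l p => PySem.List.pySetD l p.2 p.1) l, 0 ≤ x ∧ x < (l.length : Int) := by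
  induction ps with
  | nil => intro l _ hl x hx; exact hl x hx
  | cons p ps' ih =>
    intro l hk hl
    simp only [List.foldl_cons]
    obtain ⟨⟨hk0, hkn⟩, hk2⟩ := hk p (List.mem_cons_self ..)
    have hlen : (PySem.List.pySetD l p.2 p.1).length = l.length := PySem.List.length_pySetD ..
    have hl' : ∀ x ∈ PySem.List.pySetD l p.2 p.1, 0 ≤ x ∧ x < ((PySem.List.pySetD l p.2 p.1).length : Int) := by
      intro x hx
      rw [hlen]
      rw [PySem.List.pySetD_of_nonneg l _ hk2] at hx
      rcases List.mem_or_eq_of_mem_set hx with hx' | hx'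
      · exact hl x hx'
      · exact hx' ▸ ⟨hk0, hkn⟩
    intro x hx
    have := ih _ (fun q hq => by rw [hlen]; exact hk q (List.mem_cons_of_mem _ hq)) hl' x hx
    rwa [hlen] at this

-- ---- (3) A's var_to_cons check = B's filter-on-the-fly check ----

-- the (curr_sum, unassigned_count) pair A folds equals the two filter counts
theorem pv_pairfold (a : List Int) (vars : List Int) : ∀ (x y : Int),
    vars.foldl (fun (acc : Int × Int) v =>
        let vv := PySem.List.pyGetD a v 0
        if vv = 1 then (acc.1 + 1, acc.2)
        else if vv = -1 then (acc.1, acc.2 + 1)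
        else acc) (x, y) =
      (x + ((vars.filter (fun v => decide (PySem.List.pyGetD a v 0 = 1))).length : Int),
       y + ((vars.filter (fun v => decide (PySem.List.pyGetD a v 0 = -1))).length : Int)) := by
  induction vars with
  | nil => simp
  | cons v rest ih =>
    intro x y
    simp only [List.foldl_cons, List.filter_cons]
    by_cases h1 : PySem.List.pyGetD a v 0 = 1
    · simp [h1, ih]; ring
    · by_cases h2 : PySem.List.pyGetD a v 0 = -1
      · simp [h2, ih]; ring
      · simp [h1, h2, ih]

theorem pv_checkA_all (a : List Int) (cons : List (Int × List Int)) :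
    pvCheckA a cons = cons.all (fun c => pvOkB a c) := by
  induction cons with
  | nil => rfl
  | cons c rest ih =>
    obtain ⟨needed, vars⟩ := c
    simp only [pvCheckA, List.all_cons, pv_pairfold a vars 0 0, pvOkB, zero_add]
    by_cases h1 : needed < ((vars.filter (fun v => decide (PySem.List.pyGetD a v 0 = 1))).length : Int)
    · have h3 : ¬ ((vars.filter (fun v => decide (PySem.List.pyGetD a v 0 = 1))).length : Int) ≤ needed := by omega
      simp [h1, h3]
    · by_cases h2 : ((vars.filter (fun v => decide (PySem.List.pyGetD a v 0 = 1))).length : Int)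
          + ((vars.filter (fun v => decide (PySem.List.pyGetD a v 0 = -1))).length : Int) < needed
      · have h3 : ¬ needed ≤ ((vars.filter (fun v => decide (PySem.List.pyGetD a v 0 = 1))).length : Int)
            + ((vars.filter (fun v => decide (PySem.List.pyGetD a v 0 = -1))).length : Int) := by omega
        simp [h1, h2, h3]
      · have h3 : ((vars.filter (fun v => decide (PySem.List.pyGetD a v 0 = 1))).length : Int) ≤ needed := by omega
        have h4 : needed ≤ ((vars.filter (fun v => decide (PySem.List.pyGetD a v 0 = 1))).length : Int)
            + ((vars.filter (fun v => decide (PySem.List.pyGetD a v 0 = -1))).length : Int) := by omega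
        simp [h1, h2, h3, h4, ih, pvOkB]

-- enumerate-fold that ignores the index is a plain fold
theorem pv_enum_fold {α β : Type} (xs : List α) (g : β → α → β) : ∀ (s : Int) (acc : β),
    (PySem.List.enumerate xs s).foldl (fun acc p => g acc p.2) acc = xs.foldl g acc := by
  induction xs with
  | nil => intro s acc; rfl
  | cons x xs' ih =>
    intro s acc
    rw [PySem.List.enumerate_cons]
    simp only [List.foldl_cons]
    exact ih (s + 1) (g acc x)

-- inner append pass for one constraint c
theorem pv_vtc_inner (c : Int × List Int) (p : (Int × List Int) → Bool) (vs : List Int) :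
    ∀ (vt : List (List (Int × List Int))),
    (∀ v ∈ vs, 0 ≤ v ∧ v < (vt.length : Int)) →
    (vs.foldl (fun vt v => PySem.List.pySetD vt v (PySem.List.pyGetD vt v [] ++ [c])) vt).length = vt.length ∧
    ∀ i : Nat, i < vt.length →
      ((vs.foldl (fun vt v => PySem.List.pySetD vt v (PySem.List.pyGetD vt v [] ++ [c])) vt).getD i []).all p
        = (((vt.getD i []).all p) && (if (i : Int) ∈ vs then p c else true)) := by
  induction vs with
  | nil => intro vt _; simp
  | cons v vs' ih =>
    intro vt h
    obtain ⟨hv0, hvn⟩ := h v (List.mem_cons_self ..)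
    simp only [List.foldl_cons]
    have hset : PySem.List.pySetD vt v (PySem.List.pyGetD vt v [] ++ [c])
        = vt.set v.toNat (vt.getD v.toNat [] ++ [c]) := by
      rw [PySem.List.pySetD_of_nonneg vt _ hv0,
        PySem.List.pyGetD_eq_getElem vt [] hv0 (by simpa using hvn), List.getD_eq_getElem]
    rw [hset]
    have hvlt : v.toNat < vt.length := by omega
    have hlen : (vt.set v.toNat (vt.getD v.toNat [] ++ [c])).length = vt.length := List.length_set ..
    have hrest : ∀ w ∈ vs', 0 ≤ w ∧ w < ((vt.set v.toNat (vt.getD v.toNat [] ++ [c])).length : Int) := by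
      intro w hw; rw [hlen]; exact h w (List.mem_cons_of_mem _ hw)
    obtain ⟨ihl, ihg⟩ := ih _ hrest
    refine ⟨ihl.trans hlen, ?_⟩
    intro i hi
    rw [ihg i (by omega), pv_getD_set' _ _ _ _ hvlt]
    by_cases he : (i : Int) = v
    · have hiv : i = v.toNat := by omega
      rw [if_pos hiv, if_pos (by simp [he] : (i : Int) ∈ v :: vs'), ← hiv]
      simp only [List.all_append, List.all_cons, List.all_nil, Bool.and_true]
      by_cases hm2 : (i : Int) ∈ vs' <;>
        cases p c <;> simp [hm2]
    · rw [if_neg (by omega : ¬ i = v.toNat)]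
      simp [List.mem_cons, he]

theorem pv_vtc_outer (p : (Int × List Int) → Bool) (cs : List (Int × List Int)) :
    ∀ (vt : List (List (Int × List Int))),
    (∀ c ∈ cs, ∀ v ∈ c.2, 0 ≤ v ∧ v < (vt.length : Int)) →
    (cs.foldl (fun vt c => c.2.foldl (fun vt v => PySem.List.pySetD vt v (PySem.List.pyGetD vt v [] ++ [c])) vt) vt).length = vt.length ∧
    ∀ i : Nat, i < vt.length →
      ((cs.foldl (fun vt c => c.2.foldl (fun vt v => PySem.List.pySetD vt v (PySem.List.pyGetD vt v [] ++ [c])) vt) vt).getD i []).all p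
        = (((vt.getD i []).all p) && ((cs.filter (fun c => decide ((i : Int) ∈ c.2))).all p)) := by
  induction cs with
  | nil => intro vt _; simp
  | cons c cs' ih =>
    intro vt h
    simp only [List.foldl_cons]
    obtain ⟨hl1, hg1⟩ := pv_vtc_inner c p c.2 vt (h c (List.mem_cons_self ..))
    have hrest : ∀ c' ∈ cs', ∀ v ∈ c'.2, 0 ≤ v ∧ v <
        ((c.2.foldl (fun vt v => PySem.List.pySetD vt v (PySem.List.pyGetD vt v [] ++ [c])) vt).length : Int) := by
      intro c' hc' v hv; rw [hl1]; exact h c' (List.mem_cons_of_mem _ hc') v hv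
    obtain ⟨ihl, ihg⟩ := ih _ hrest
    refine ⟨ihl.trans hl1, ?_⟩
    intro i hi
    rw [ihg i (by omega), hg1 i hi, List.filter_cons]
    by_cases hm : (i : Int) ∈ c.2
    · simp [hm, Bool.and_assoc]
    · simp [hm]

-- ---- (4) remap equality (zip form = enumerate form) ----

theorem pv_remap_aux (a : List Int) : ∀ (pre si : List Int) (init : List Int),
    a.length = si.length →
    (PySem.List.enumerate a (pre.length : Int)).foldl
      (fun sol p => PySem.List.pySetD sol (PySem.List.pyGetD (pre ++ si) p.1 0) p.2) init =
    (si.zip a).foldl (fun sol p => PySem.List.pySetD sol p.1 p.2) init := by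
  induction a with
  | nil => intro pre si init h; simp
  | cons y a' ih =>
    intro pre si init h
    cases si with
    | nil => simp at h
    | cons x si' =>
      simp only [PySem.List.enumerate_cons, List.zip_cons_cons, List.foldl_cons]
      have hx : PySem.List.pyGetD (pre ++ x :: si') (pre.length : Int) 0 = x := by
        rw [PySem.List.pyGetD_natCast]
        simp [List.getD]
      rw [hx]
      have := ih (pre ++ [x]) si' (PySem.List.pySetD init x y) (by simpa using h)
      simpa using this

theorem pv_remap_eq (si : List Int) (n : Nat) (a : List Int) (h : a.length = si.length) :
    pvRemapA si n a = pvRemapB si n a := by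
  have := pv_remap_aux a [] si (List.replicate n 0) h
  simpa [pvRemapA, pvRemapB] using this

-- ---- (5) the bridge: recursion = stack loop ----

theorem pv_solveA_cap (n : Nat) (vtc : List (List (Int × List Int))) (si : List Int)
    (fuel idx : Nat) (a : List Int) (sols : List (List Int)) (h : 50 ≤ sols.length) :
    pvSolveA n vtc si fuel idx a sols = sols := by
  cases fuel <;> simp [pvSolveA, h]

theorem pv_foldl_cap (n : Nat) (vtc : List (List (Int × List Int))) (si : List Int)
    (stack : List (Nat × List Int)) (sols : List (List Int)) (h : 50 ≤ sols.length) :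
    stack.foldl (fun s p => pvSolveA n vtc si (n + 1 - p.1) p.1 p.2 s) sols = sols := by
  induction stack with
  | nil => rfl
  | cons p rest ih => simp [List.foldl_cons, pv_solveA_cap _ _ _ _ _ _ _ h, ih]

def pvFb (n : Nat) (stack : List (Nat × List Int)) : Nat :=
  (stack.map (fun p => 3 ^ (n + 1 - p.1))).sum

theorem pv_step (n : Nat) (vtc : List (List (Int × List Int))) (scs : List (Int × List Int))
    (si : List Int)
    (hchk : ∀ (a : List Int) (idx : Nat), idx < n → pvCheckA a (vtc.getD idx []) = pvCheckB a idx scs)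
    (idx : Nat) (a : List Int) (sols : List (List Int)) (hidx : idx < n)
    (hcap : sols.length < 50) :
    pvSolveA n vtc si (n + 1 - idx) idx a sols =
      (fun s => if pvCheckB (a.set idx 1) idx scs
                then pvSolveA n vtc si (n - idx) (idx + 1) (a.set idx 1) s else s)
      ((fun s => if pvCheckB (a.set idx 0) idx scs
                then pvSolveA n vtc si (n - idx) (idx + 1) (a.set idx 0) s else s) sols) := by
  have hchk' : ∀ a', pvCheckA a' (vtc.getD idx []) = pvCheckB a' idx scs :=
    fun a' => hchk a' idx hidx
  have hf : n + 1 - idx = (n - idx) + 1 := by omega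
  rw [hf]
  simp only [pvSolveA, if_neg (by omega : ¬ 50 ≤ sols.length), if_neg (by omega : ¬ idx = n),
    hchk']
  by_cases h0 : pvCheckB (a.set idx 0) idx scs
  · simp only [h0, if_true]
    by_cases hc : 50 ≤ (pvSolveA n vtc si (n - idx) (idx + 1) (a.set idx 0) sols).length
    · simp only [if_pos hc]
      by_cases h1 : pvCheckB (a.set idx 1) idx scs <;>
        simp [pv_solveA_cap _ _ _ _ _ _ _ hc]
    · simp only [if_neg hc]
  · simp only [h0, Bool.false_eq_true, if_false]
    rw [if_neg (by omega : ¬ 50 ≤ sols.length)]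

theorem pv_bridge (n : Nat) (vtc : List (List (Int × List Int))) (scs : List (Int × List Int))
    (si : List Int) (hsi : si.length = n)
    (hchk : ∀ (a : List Int) (idx : Nat), idx < n → pvCheckA a (vtc.getD idx []) = pvCheckB a idx scs) :
    ∀ (fuel : Nat) (stack : List (Nat × List Int)) (sols : List (List Int)),
      (∀ p ∈ stack, p.1 ≤ n ∧ p.2.length = n) → pvFb n stack ≤ fuel →
      pvLoopB n scs si fuel stack sols =
        stack.foldl (fun s p => pvSolveA n vtc si (n + 1 - p.1) p.1 p.2 s) sols := by
  intro fuel
  induction fuel with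
  | zero =>
    intro stack sols hinv hfb
    cases stack with
    | nil => rfl
    | cons p rest =>
      exfalso
      obtain ⟨idx, a⟩ := p
      simp [pvFb] at hfb
  | succ fuel ih =>
    intro stack sols hinv hfb
    cases stack with
    | nil => rfl
    | cons p rest =>
      obtain ⟨idx, a⟩ := p
      by_cases hcap : 50 ≤ sols.length
      · rw [show pvLoopB n scs si (fuel+1) ((idx, a) :: rest) sols = sols by
          simp [pvLoopB, hcap]]
        rw [List.foldl_cons, pv_solveA_cap _ _ _ _ _ _ _ hcap, pv_foldl_cap _ _ _ _ _ hcap]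
      · have hinv' := hinv (idx, a) (List.mem_cons_self ..)
        by_cases hn : idx = n
        · rw [show pvLoopB n scs si (fuel+1) ((idx, a) :: rest) sols
              = pvLoopB n scs si fuel rest (sols ++ [pvRemapB si n a]) by
            simp [pvLoopB, hcap, hn]]
          have h1 : 1 ≤ 3 ^ (n + 1 - idx) := Nat.one_le_pow _ _ (by omega)
          rw [ih rest _ (fun q hq => hinv q (List.mem_cons_of_mem _ hq))
              (by simp [pvFb] at hfb ⊢; omega)]
          rw [List.foldl_cons]
          have hs : pvSolveA n vtc si (n + 1 - idx) idx a sols = sols ++ [pvRemapA si n a] := by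
            rw [show n + 1 - idx = 0 + 1 by omega]
            simp [pvSolveA, hcap, hn]
          rw [hs, pv_remap_eq si n a (hinv'.2.trans hsi.symm)]
        · have hidx : idx < n := by omega
          rw [show pvLoopB n scs si (fuel+1) ((idx, a) :: rest) sols
              = pvLoopB n scs si fuel
                ((if pvCheckB (a.set idx 0) idx scs then [(idx + 1, a.set idx 0)] else []) ++
                 (if pvCheckB (a.set idx 1) idx scs then [(idx + 1, a.set idx 1)] else []) ++ rest) sols by
            simp [pvLoopB, hcap, hn]]
          rw [ih _ _ ?inv ?fb]
          case inv =>
            intro q hq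
            simp only [List.mem_append] at hq
            rcases hq with (hq | hq) | hq
            · split at hq <;> simp_all
            · split at hq <;> simp_all
            · exact hinv q (List.mem_cons_of_mem _ hq)
          case fb =>
            have h3 : (1:Nat) ≤ 3 ^ (n - idx) := Nat.one_le_pow _ _ (by omega)
            have hsplit : n + 1 - idx = (n - idx) + 1 := by omega
            simp only [pvFb, List.map_append, List.sum_append, List.map_cons, List.sum_cons,
              hsplit] at hfb ⊢
            have e1 : ((if pvCheckB (a.set idx 0) idx scs then [(idx + 1, a.set idx 0)] else []).map
                (fun p => 3 ^ (n + 1 - p.1))).sum ≤ 3 ^ (n - idx) := by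
              split <;> simp [show n + 1 - (idx + 1) = n - idx by omega]
            have e2 : ((if pvCheckB (a.set idx 1) idx scs then [(idx + 1, a.set idx 1)] else []).map
                (fun p => 3 ^ (n + 1 - p.1))).sum ≤ 3 ^ (n - idx) := by
              split <;> simp [show n + 1 - (idx + 1) = n - idx by omega]
            have : 3 ^ ((n - idx) + 1) = 3 * 3 ^ (n - idx) := by ring
            omega
          rw [List.foldl_append, List.foldl_append, List.foldl_cons]
          rw [pv_step n vtc scs si hchk idx a sols hidx (by omega)]
          have hrw : ∀ (b : Bool) (fr : Nat × List Int) (s : List (List Int)),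
              (if b then [fr] else []).foldl (fun s p => pvSolveA n vtc si (n + 1 - p.1) p.1 p.2 s) s
              = if b then pvSolveA n vtc si (n + 1 - fr.1) fr.1 fr.2 s else s := by
            intro b fr s; cases b <;> simp
          rw [hrw, hrw]
          simp [show n + 1 - (idx + 1) = n - idx by omega]

-- ---- (6) assembling the whole program ----

theorem pv_main (coords : List Int) (constraints : List (Int × List Int))
    (hpre : ∀ c ∈ constraints, ∀ v ∈ c.2, 0 ≤ v ∧ v < (coords.length : Int)) :
    solve_component_smart coords constraints = solve_component_smart_alt coords constraints := by
  by_cases hc : constraints = []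
  · simp [solve_component_smart, solve_component_smart_alt, hc]
  · simp only [solve_component_smart, solve_component_smart_alt, if_neg hc]
    -- shared abbreviations (the zeta-reduced let-bindings of the two definitions)
    have hvc : constraints.foldl
        (fun vc c => c.2.foldl (fun vc v => PySem.List.pySetD vc v (PySem.List.pyGetD vc v 0 + 1)) vc)
        (List.replicate coords.length 0)
      = (PySem.List.pyRange 0 (coords.length : Int) 1).map
          (fun i => (PySem.List.count (constraints.flatMap (fun c => c.2)) i : Int)) :=
      pv_var_counts_eq coords.length constraints hpre
    rw [hvc]
    set n := coords.length with hn
    set vcB : List Int := (PySem.List.pyRange 0 (n : Int) 1).map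
      (fun i => (PySem.List.count (constraints.flatMap (fun c => c.2)) i : Int)) with hvcB
    set si : List Int := PySem.List.sorted (PySem.List.pyRange 0 (n : Int) 1)
      (fun i => -(PySem.List.pyGetD vcB i 0)) false with hsi_def
    have hsilen : si.length = n := by
      rw [hsi_def, PySem.List.length_sorted, PySem.List.length_pyRange_one]; simp
    have hsimem : ∀ x ∈ si, 0 ≤ x ∧ x < (n : Int) := by
      intro x hx
      rw [hsi_def, PySem.List.mem_sorted, PySem.List.mem_pyRange_one] at hx
      exact hx
    set L : List Int := (PySem.List.enumerate si).foldl
      (fun l p => PySem.List.pySetD l p.2 p.1) (List.replicate n 0) with hL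
    set d : PySem.Dict Int Int := (PySem.List.enumerate si).foldl
      (fun d p => PySem.Dict.insert d p.2 p.1) PySem.Dict.empty with hd
    have hkeys : ∀ p ∈ PySem.List.enumerate si, 0 ≤ p.2 ∧ p.2 < ((List.replicate n (0:Int)).length : Int) := by
      intro p hp
      rw [PySem.List.mem_enumerate_iff] at hp
      obtain ⟨k, hk, rfl⟩ := hp
      simpa using hsimem _ (List.getElem_mem hk)
    obtain ⟨hLlen, hlook⟩ := pv_invperm (PySem.List.enumerate si) PySem.Dict.empty
      (List.replicate n 0) hkeys
      (by
        intro v hv0 hvn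
        rw [PySem.Dict.get?_empty]
        rw [PySem.List.pyGetD_eq_getElem _ 0 hv0 hvn]
        simp)
    rw [← hL, ← hd] at *
    have hLlen' : L.length = n := by simpa using hLlen
    have hLrange : ∀ x ∈ L, 0 ≤ x ∧ x < (n : Int) := by
      have := pv_invperm_range (PySem.List.enumerate si) (List.replicate n 0)
        (by
          intro p hp
          rw [PySem.List.mem_enumerate_iff] at hp
          obtain ⟨k, hk, rfl⟩ := hp
          refine ⟨⟨by simp, ?_⟩, (hsimem _ (List.getElem_mem hk)).1⟩
          have hkn : k < n := by rw [← hsilen]; exact hk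
          simp only [List.length_replicate]
          omega)
        (by
          intro x hx
          have h0 : x = 0 := List.eq_of_mem_replicate hx
          have hn0 : n ≠ 0 := (List.mem_replicate.mp hx).1
          subst h0
          simp only [List.length_replicate]
          omega)
      intro x hx
      simpa using this x (by exact hx)
    have hlook' : ∀ v : Int, 0 ≤ v → v < (n : Int) →
        (PySem.Dict.get? d v).getD 0 = PySem.List.pyGetD L v 0 := by
      intro v hv0 hvn
      exact hlook v hv0 (by simpa using hvn)
    -- the two sorted_constraints are the same list
    have hscs : constraints.map
        (fun c => (c.1, PySem.List.sorted (c.2.map (fun v => (PySem.Dict.get? d v).getD 0)) (fun x => x) false))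
      = constraints.map
        (fun c => (c.1, PySem.List.sorted (c.2.map (fun v => PySem.List.pyGetD L v 0)) (fun x => x) false)) := by
      apply List.map_congr_left
      intro c hcmem
      have : c.2.map (fun v => (PySem.Dict.get? d v).getD 0)
          = c.2.map (fun v => PySem.List.pyGetD L v 0) := by
        apply List.map_congr_left
        intro v hv
        obtain ⟨hv0, hvn⟩ := hpre c hcmem v hv
        exact hlook' v hv0 hvn
      rw [this]
    rw [hscs]
    set scs : List (Int × List Int) := constraints.map
      (fun c => (c.1, PySem.List.sorted (c.2.map (fun v => PySem.List.pyGetD L v 0)) (fun x => x) false)) with hscs_def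
    -- every remapped variable is in [0, n)
    have hv : ∀ c ∈ scs, ∀ v ∈ c.2, 0 ≤ v ∧ v < (n : Int) := by
      intro c hcmem v hvmem
      rw [hscs_def, List.mem_map] at hcmem
      obtain ⟨c0, hc0, rfl⟩ := hcmem
      rw [PySem.List.mem_sorted, List.mem_map] at hvmem
      obtain ⟨w, hw, rfl⟩ := hvmem
      obtain ⟨hw0, hwn⟩ := hpre c0 hc0 w hw
      exact hLrange _ (PySem.List.pyGetD_mem L 0 (by constructor <;> omega))
    -- A's indexed check = B's filtered check
    have hchk : ∀ (a : List Int) (idx : Nat), idx < n →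
        pvCheckA a (((PySem.List.enumerate scs).foldl
          (fun (vt : List (List (Int × List Int))) p =>
            p.2.2.foldl (fun vt v => PySem.List.pySetD vt v (PySem.List.pyGetD vt v [] ++ [p.2])) vt)
          (List.replicate n [])).getD idx []) = pvCheckB a idx scs := by
      intro a idx hidx
      rw [pv_enum_fold scs
        (fun (vt : List (List (Int × List Int))) c =>
          c.2.foldl (fun vt v => PySem.List.pySetD vt v (PySem.List.pyGetD vt v [] ++ [c])) vt) 0]
      rw [pv_checkA_all]
      obtain ⟨hlen2, hg2⟩ := pv_vtc_outer (fun c => pvOkB a c) scs (List.replicate n [])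
        (by simpa using hv)
      rw [hg2 idx (by simpa using hidx)]
      simp [pvCheckB]
    exact pv_bridge n _ scs si hsilen hchk (3 ^ (n + 1)) [(0, List.replicate n (-1))] []
      (by intro p hp; simp only [List.mem_singleton] at hp; subst hp; simp)
      (by simp [pvFb]) |>.symm.trans (by simp)

-- ===== VERDICT (by name: the statement is the Claim_ definition above) =====
theorem solve_component_smart_spec : Claim_equal_solve_component_smart := by
  intro coords constraints _ hpre
  unfold Spec_solve_component_smart
  exact pv_main coords constraints hpre
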